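-- pv_equiv track=rewrite | github.com/Techbarsha/GFG-POTD | geekstreak60_2026/Day31_Number of BST From Array.py | countBSTs
-- ===== SOURCE A (Python) =====
-- def countBSTs(arr):
--     # code here
--     # This code implemented by Barsha Saha
--     n = len(arr)
--
--     # Store value with original index
--     indexed_arr = [(val, i) for i, val in enumerate(arr)]
--
--     # Sort by value
--     indexed_arr.sort()
--
--     # Precompute Catalan numbers
--     catalan = [0] * (n + 1)
--     catalan[0] = catalan[1] = 1
--
--     for i in range(2, n + 1):
--         for j in range(i):
--             catalan[i] += catalan[j] * catalan[i - j - 1]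
--
--     # Prepare result
--     res = [0] * n
--
--     # Compute for each root
--     for i in range(n):
--         val, original_index = indexed_arr[i]
--
--         L = i
--         R = n - i - 1
--
--         res[original_index] = catalan[L] * catalan[R]
--
--     return res
-- ===== SOURCE B (Python) =====
-- def countBSTs(arr):
--     n = len(arr)
--     # Catalan numbers C(0..n-1) by the multiplicative recurrence, linear time
--     cats = [1]
--     for i in range(n - 1):
--         cats.append(cats[-1] * (2 * (2 * i + 1)) // (i + 2))
--     res = [0] * n
--     for rank, (_, idx) in enumerate(sorted((v, i) for i, v in enumerate(arr))):
--         res[idx] = cats[rank] * cats[n - 1 - rank]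
--     return res
-- ===== Notes on version B (the rewrite author's own statement) =====
-- stated objective: faster
-- what changed: B replaces A's O(n^2) convolution DP for the Catalan table by the linear multiplicative recurrence C(i+1)=C(i)*2(2i+1)//(i+2) and fills the result in one enumerate pass over the sorted (value,index) pairs.
import Mathlib
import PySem

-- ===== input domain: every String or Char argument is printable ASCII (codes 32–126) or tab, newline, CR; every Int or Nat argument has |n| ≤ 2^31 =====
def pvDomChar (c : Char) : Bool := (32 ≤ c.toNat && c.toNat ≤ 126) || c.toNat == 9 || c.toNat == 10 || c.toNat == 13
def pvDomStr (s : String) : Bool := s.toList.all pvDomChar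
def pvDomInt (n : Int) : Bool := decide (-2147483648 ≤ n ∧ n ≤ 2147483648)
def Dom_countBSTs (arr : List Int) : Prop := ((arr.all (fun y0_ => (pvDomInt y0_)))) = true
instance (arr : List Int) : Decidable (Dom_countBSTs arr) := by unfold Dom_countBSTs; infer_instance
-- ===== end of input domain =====

-- B replaces A's O(n^2) convolution DP for the Catalan table by the linear multiplicative
-- recurrence C(i+1)=C(i)*2(2i+1)//(i+2) and fills the result in one enumerate pass; same values proved.


-- ===== PORT A =====
def countBSTs (arr : List Int) : List Int :=
  let n : Int := arr.length
  -- indexed_arr = [(val, i) for i, val in enumerate(arr)]; indexed_arr.sort()  (tuple order = lexicographic)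
  let indexed := PySem.List.sorted2 ((PySem.List.enumerate arr 0).map (fun p => (p.2, p.1)))
      (fun p => p.1) (fun p => p.2) false
  -- catalan = [0]*(n+1); catalan[0] = catalan[1] = 1  (for n = 0 the second assignment raises IndexError)
  let cat0 := PySem.List.pySetD (PySem.List.pySetD (List.replicate (arr.length + 1) (0:Int)) 0 1) 1 1
  -- for i in range(2, n+1): for j in range(i): catalan[i] += catalan[j] * catalan[i-j-1]
  let cat := (PySem.List.pyRange 2 (n+1) 1).foldl (fun cat i =>
      (PySem.List.pyRange 0 i 1).foldl (fun cat j =>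
        PySem.List.pySetD cat i
          (PySem.List.pyGetD cat i 0 + PySem.List.pyGetD cat j 0 * PySem.List.pyGetD cat (i-j-1) 0)) cat) cat0
  -- res = [0]*n; for i in range(n): val, oi = indexed_arr[i]; res[oi] = catalan[i] * catalan[n-i-1]
  let res0 := List.replicate arr.length (0:Int)
  (PySem.List.pyRange 0 n 1).foldl (fun res i =>
      let p := PySem.List.pyGetD indexed i (0, 0)
      PySem.List.pySetD res p.2
        (PySem.List.pyGetD cat i 0 * PySem.List.pyGetD cat (n - i - 1) 0)) res0

-- ===== PORT B =====
def countBSTs_alt (arr : List Int) : List Int :=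
  let n : Int := arr.length
  -- cats = [1]; for i in range(n-1): cats.append(cats[-1] * (2*(2*i+1)) // (i+2))
  let cats := (PySem.List.pyRange 0 (n-1) 1).foldl (fun cs i =>
      cs ++ [PySem.Int.floordiv (PySem.List.pyGetD cs (-1) 0 * (2*(2*i+1))) (i+2)]) [1]
  -- sorted((v, i) for i, v in enumerate(arr))
  let pairs := PySem.List.sorted2 ((PySem.List.enumerate arr 0).map (fun p => (p.2, p.1)))
      (fun p => p.1) (fun p => p.2) false
  -- res = [0]*n; for rank, (_, idx) in enumerate(...): res[idx] = cats[rank] * cats[n-1-rank]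
  (PySem.List.enumerate pairs 0).foldl (fun res q =>
      PySem.List.pySetD res q.2.2
        (PySem.List.pyGetD cats q.1 0 * PySem.List.pyGetD cats (n - 1 - q.1) 0))
    (List.replicate arr.length (0:Int))

-- ===== PRECONDITION & SPEC =====
-- Pre_ excludes only the empty list: there A raises IndexError (it assigns catalan[1] into a length-1 table).
def Pre_countBSTs (arr : List Int) : Prop := arr ≠ []
instance (arr : List Int) : Decidable (Pre_countBSTs arr) := by unfold Pre_countBSTs; infer_instance
def pvWitness_countBSTs : List Int := ([2, 1, 3] : List Int)

def Spec_countBSTs (arr : List Int) (out : List Int) : Prop := out = countBSTs_alt arr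
instance (arr : List Int) (out : List Int) : Decidable (Spec_countBSTs arr out) := by unfold Spec_countBSTs; infer_instance

-- ===== CLAIM (what is proved, stated in full; the proofs are below) =====
def Claim_equal_countBSTs : Prop := ∀ (arr : List Int), Dom_countBSTs arr → Pre_countBSTs arr → Spec_countBSTs arr (countBSTs arr)

-- ===== LEMMAS AND PROOFS =====

def catI (k : Nat) : Int := (catalan k : Int)

lemma catalan_mul_step (m : Nat) : (m+2) * catalan (m+1) = 2*(2*m+1) * catalan m := by
  have h1 := succ_mul_catalan_eq_centralBinom (m+1)
  have h2 := Nat.succ_mul_centralBinom_succ m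
  have h3 := succ_mul_catalan_eq_centralBinom m
  have key : (m+1) * ((m+2) * catalan (m+1)) = (m+1) * (2*(2*m+1) * catalan m) := by
    calc (m+1) * ((m+2) * catalan (m+1)) = (m+1) * ((m+1+1) * catalan (m+1)) := by ring_nf
      _ = (m+1) * Nat.centralBinom (m+1) := by rw [h1]
      _ = 2*(2*m+1) * Nat.centralBinom m := h2
      _ = 2*(2*m+1) * ((m+1) * catalan m) := by rw [h3]
      _ = (m+1) * (2*(2*m+1) * catalan m) := by ring
  exact Nat.eq_of_mul_eq_mul_left (by omega) key

lemma catsB_fold (m : Nat) :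
    (PySem.List.pyRange 0 (m:Int) 1).foldl
      (fun cs i => cs ++ [PySem.Int.floordiv (PySem.List.pyGetD cs (-1) 0 * (2*(2*i+1))) (i+2)]) [1]
    = (List.range (m+1)).map catI := by
  induction m with
  | zero => simp [catI]
  | succ m ih =>
      have hc : ((m+1 : Nat) : Int) = (m:Int) + 1 := by push_cast; ring
      rw [hc, PySem.List.pyRange_one_succ_right (by positivity), List.foldl_append, ih]
      simp only [List.foldl_cons, List.foldl_nil]
      have hsplit : (List.range (m+1)).map catI = (List.range m).map catI ++ [catI m] := by
        rw [List.range_succ, List.map_append]; rfl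
      rw [hsplit, PySem.List.pyGetD_neg_one_append_singleton]
      have hdvd : catI m * (2*(2*(m:Int)+1)) = ((m:Int)+2) * catI (m+1) := by
        have := catalan_mul_step m
        unfold catI
        nlinarith [this]
      rw [hdvd, PySem.Int.floordiv_eq_ediv_of_pos (by positivity),
          Int.mul_ediv_cancel_left _ (by positivity)]
      rw [show (m+1)+1 = m+2 from rfl, List.range_succ (n := m+1), List.map_append]
      rw [hsplit]; rfl

lemma getD_set_self (l : List Int) (i : Nat) (v : Int) (h : i < l.length) :
    (l.set i v).getD i 0 = v := by simp [List.getD, h]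

lemma getD_set_ne (l : List Int) (i j : Nat) (v : Int) (h : j ≠ i) :
    (l.set i v).getD j 0 = l.getD j 0 := by simp [List.getD, Ne.symm h]

lemma innerA (cat : List Int) (i : Nat) (hi : i < cat.length) :
    ∀ (m : Nat), m ≤ i → ∀ (a : Int),
    (PySem.List.pyRange 0 (m:Int) 1).foldl
      (fun c j => PySem.List.pySetD c (i:Int)
        (PySem.List.pyGetD c (i:Int) 0 + PySem.List.pyGetD c j 0 * PySem.List.pyGetD c ((i:Int)-j-1) 0))
      (cat.set i a)
    = cat.set i (a + ∑ j ∈ Finset.range m, cat.getD j 0 * cat.getD (i-1-j) 0) := by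
  intro m
  induction m with
  | zero => intro _ a; simp
  | succ m ih =>
      intro hm a
      have hc : ((m+1 : Nat) : Int) = (m:Int) + 1 := by push_cast; ring
      rw [hc, PySem.List.pyRange_one_succ_right (by positivity), List.foldl_append,
          ih (by omega) a]
      simp only [List.foldl_cons, List.foldl_nil]
      have hlen : i < (cat.set i (a + ∑ j ∈ Finset.range m, cat.getD j 0 * cat.getD (i-1-j) 0)).length := by
        simpa using hi
      have hij : ((i:Int) - (m:Int) - 1) = ((i-1-m : Nat) : Int) := by omega
      rw [hij]
      simp only [PySem.List.pySetD_natCast, PySem.List.pyGetD_natCast]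
      rw [getD_set_self _ _ _ hi, getD_set_ne _ _ _ _ (by omega), getD_set_ne _ _ _ _ (by omega)]
      rw [List.set_set, Finset.sum_range_succ]
      ring_nf

def tblC (n k : Nat) : List Int := (List.range (k+1)).map catI ++ List.replicate (n-k) 0

lemma tblC_length (n k : Nat) (h : k ≤ n) : (tblC n k).length = n + 1 := by
  simp [tblC]; omega

lemma tblC_getD_le (n k j : Nat) (hj : j ≤ k) : (tblC n k).getD j 0 = catI j := by
  simp [tblC, List.getD, List.getElem?_append_left (by simp; omega : j < ((List.range (k+1)).map catI).length),
        List.getElem?_range (by omega : j < k+1)]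

lemma tblC_succ (n k : Nat) :
    tblC n (k+1) = (List.range (k+1)).map catI ++ catI (k+1) :: List.replicate (n-k-1) 0 := by
  simp [tblC, List.range_succ (n := k+1), List.map_append]
  omega

lemma tblC_set (n k : Nat) (hk : k < n) (v : Int) :
    (tblC n k).set (k+1) v = (List.range (k+1)).map catI ++ v :: List.replicate (n-k-1) 0 := by
  have hrep : List.replicate (n-k) (0:Int) = 0 :: List.replicate (n-k-1) 0 := by
    rw [← List.replicate_succ]; congr 1; omega
  have hpos : k+1 = ((List.range (k+1)).map catI).length := by simp
  rw [tblC, hrep, hpos]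
  simp

lemma tblC_set_self (n k : Nat) (hk : k < n) : (tblC n k).set (k+1) 0 = tblC n k := by
  rw [tblC_set n k hk, tblC]
  have hrep : List.replicate (n-k) (0:Int) = 0 :: List.replicate (n-k-1) 0 := by
    rw [← List.replicate_succ]; congr 1; omega
  rw [hrep]

lemma sum_tblC_catalan (n k : Nat) :
    (0:Int) + ∑ j ∈ Finset.range (k+1), (tblC n k).getD j 0 * (tblC n k).getD (k+1-1-j) 0
    = catI (k+1) := by
  rw [zero_add]
  have hterm : ∀ j ∈ Finset.range (k+1),
      (tblC n k).getD j 0 * (tblC n k).getD (k+1-1-j) 0 = catI j * catI (k - j) := by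
    intro j hj
    rw [Finset.mem_range] at hj
    rw [tblC_getD_le n k j (by omega), show k+1-1-j = k-j by omega, tblC_getD_le n k (k-j) (by omega)]
  rw [Finset.sum_congr rfl hterm]
  have hcat : catalan (k+1) = ∑ j ∈ Finset.range (k+1), catalan j * catalan (k - j) := by
    rw [catalan_succ]
    exact Fin.sum_univ_eq_sum_range (fun i => catalan i * catalan (k - i)) (k+1)
  unfold catI
  rw [hcat]
  push_cast
  rfl

lemma outerA (n : Nat) : ∀ (d k : Nat), k + d = n → 1 ≤ k →
    (PySem.List.pyRange ((k:Int)+1) ((n:Int)+1) 1).foldl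
      (fun cat i =>
        (PySem.List.pyRange 0 i 1).foldl (fun c j =>
          PySem.List.pySetD c i
            (PySem.List.pyGetD c i 0 + PySem.List.pyGetD c j 0 * PySem.List.pyGetD c (i-j-1) 0)) cat)
      (tblC n k)
    = tblC n n := by
  intro d
  induction d with
  | zero =>
      intro k hk0 _
      rw [PySem.List.pyRange_one_eq_nil (by omega)]
      simp only [List.foldl_nil]
      obtain rfl : k = n := by omega
      rfl
  | succ d ih =>
      intro k hk h1
      have hkn : k < n := by omega
      rw [PySem.List.pyRange_one_cons (by omega)]
      simp only [List.foldl_cons]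
      have hstep :
          (PySem.List.pyRange 0 ((k:Int)+1) 1).foldl (fun c j =>
            PySem.List.pySetD c ((k:Int)+1)
              (PySem.List.pyGetD c ((k:Int)+1) 0 + PySem.List.pyGetD c j 0 * PySem.List.pyGetD c (((k:Int)+1)-j-1) 0))
            (tblC n k)
          = tblC n (k+1) := by
        have hc : ((k:Int)+1) = ((k+1 : Nat) : Int) := by push_cast; ring
        rw [hc, ← tblC_set_self n k hkn,
            innerA (tblC n k) (k+1) (by rw [tblC_length n k (by omega)]; omega) (k+1) (le_refl _) 0,
            sum_tblC_catalan n k]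
        rw [tblC_set n k hkn, tblC_succ n k]
      rw [hstep]
      have := ih (k+1) (by omega) (by omega)
      have hc2 : ((k:Int)+1)+1 = ((k+1:Nat):Int)+1 := by push_cast; ring
      rw [hc2]
      exact this

lemma cat0_eq (l : Nat) :
    PySem.List.pySetD (PySem.List.pySetD (List.replicate ((l+1) + 1) (0:Int)) 0 1) 1 1
    = tblC (l+1) 1 := by
  rw [PySem.List.pySetD_of_nonneg _ _ (by norm_num), PySem.List.pySetD_of_nonneg _ _ (by norm_num)]
  simp [tblC, List.replicate_succ, List.range_succ, catI]

lemma reads_tbl (n : Nat) (i : Int) (h0 : 0 ≤ i) (h1 : i < n) :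
    PySem.List.pyGetD (tblC n n) i 0 = catI i.toNat := by
  rw [PySem.List.pyGetD_eq_getElem _ 0 h0 (by rw [tblC_length n n (le_refl _)]; push_cast; omega)]
  have := tblC_getD_le n n i.toNat (by omega)
  rw [List.getD_eq_getElem _ _ (by rw [tblC_length n n (le_refl _)]; omega)] at this
  exact this

lemma reads_cats (n : Nat) (i : Int) (h0 : 0 ≤ i) (h1 : i < n) :
    PySem.List.pyGetD ((List.range n).map catI) i 0 = catI i.toNat := by
  rw [PySem.List.pyGetD_eq_getElem _ 0 h0 (by simp; omega)]
  simp


lemma ports_agree (arr : List Int) (h : arr ≠ []) : countBSTs arr = countBSTs_alt arr := by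
  obtain ⟨l, hl⟩ : ∃ l, arr.length = l + 1 :=
    ⟨arr.length - 1, by cases arr with | nil => exact absurd rfl h | cons a t => simp⟩
  unfold countBSTs countBSTs_alt
  simp only []
  -- name the common sorted list
  set pairs := PySem.List.sorted2 ((PySem.List.enumerate arr 0).map (fun p => (p.2, p.1)))
      (fun p => p.1) (fun p => p.2) false with hpairs
  -- A's catalan table equals tblC
  have hcat : (PySem.List.pyRange 2 ((arr.length:Int)+1) 1).foldl (fun cat i =>
      (PySem.List.pyRange 0 i 1).foldl (fun cat j =>
        PySem.List.pySetD cat i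
          (PySem.List.pyGetD cat i 0 + PySem.List.pyGetD cat j 0 * PySem.List.pyGetD cat (i-j-1) 0)) cat)
      (PySem.List.pySetD (PySem.List.pySetD (List.replicate (arr.length + 1) (0:Int)) 0 1) 1 1)
      = tblC arr.length arr.length := by
    rw [hl, cat0_eq l, show (2:Int) = ((1:Nat):Int)+1 by norm_num,
        show ((l+1:Nat):Int) = (((l+1:Nat)):Int) from rfl]
    exact outerA (l+1) l 1 (by omega) (le_refl _)
  rw [hcat]
  -- B's cats equals map catI
  have hcats : (PySem.List.pyRange 0 ((arr.length:Int)-1) 1).foldl (fun cs i =>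
      cs ++ [PySem.Int.floordiv (PySem.List.pyGetD cs (-1) 0 * (2*(2*i+1))) (i+2)]) [1]
      = (List.range arr.length).map catI := by
    rw [hl, show ((l+1:Nat):Int)-1 = ((l:Nat):Int) by push_cast; ring]
    exact catsB_fold l
  rw [hcats]
  -- B's enumerate fold as a pyRange fold
  have hlenp : PySem.List.len pairs = (arr.length : Int) := by
    have hp := PySem.List.sorted2_perm ((PySem.List.enumerate arr 0).map (fun p => (p.2, p.1)))
      (fun p => p.1) (fun p => p.2) false
    simp [PySem.List.len, hpairs, hp.length_eq]
  rw [PySem.List.enumerate_eq_map_pyRange pairs ((0:Int),(0:Int)), hlenp, List.foldl_map]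
  apply PySem.List.foldl_congr_mem
  intro acc i hi
  rw [PySem.List.mem_pyRange_one] at hi
  have h1 : i < (arr.length : Int) := hi.2
  have h0 : 0 ≤ i := hi.1
  have e1 : PySem.List.pyGetD (tblC arr.length arr.length) i 0
      = PySem.List.pyGetD ((List.range arr.length).map catI) i 0 := by
    rw [reads_tbl _ _ h0 h1, reads_cats _ _ h0 h1]
  have e2 : PySem.List.pyGetD (tblC arr.length arr.length) ((arr.length:Int) - i - 1) 0
      = PySem.List.pyGetD ((List.range arr.length).map catI) ((arr.length:Int) - 1 - i) 0 := by
    rw [show ((arr.length:Int) - i - 1) = ((arr.length:Int) - 1 - i) by ring,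
        reads_tbl _ _ (by omega) (by omega), reads_cats _ _ (by omega) (by omega)]
  rw [e1, e2]

-- ===== VERDICT (by name: the statement is the Claim_ definition above) =====
theorem countBSTs_spec : Claim_equal_countBSTs := by
  intro arr _ hpre
  unfold Spec_countBSTs
  exact ports_agree arr hpre
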